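-- pv_equiv track=rewrite | github.com/rajbudigam/datadebt | backend/routers/scan.py | _pick_profile_candidate
-- ===== SOURCE A (Python) =====
-- from typing import Optional, List
--
-- def _pick_profile_candidate(distributions) -> Optional[str]:
--     # Prefer CSV/TSV/TXT, then JSON/GeoJSON/XLSX, else None
--     best = None
--     for r in distributions or []:
--         url = (r.get("url") or "").lower()
--         if url.endswith((".csv",".tsv",".txt")):
--             return r.get("url")
--         if best is None and url.endswith((".json",".geojson",".xlsx",".xls",".parquet")):
--             best = r.get("url")
--     return best
-- ===== SOURCE B (Python) =====
-- from typing import Optional, List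
--
-- _TABULAR = (".csv", ".tsv", ".txt")
-- _SECONDARY = (".json", ".geojson", ".xlsx", ".xls", ".parquet")
--
-- def _pick_profile_candidate(distributions) -> Optional[str]:
--     rows = distributions or []
--     first = next((r.get("url") for r in rows
--                   if (r.get("url") or "").lower().endswith(_TABULAR)), None)
--     if first is not None:
--         return first
--     return next((r.get("url") for r in rows
--                  if (r.get("url") or "").lower().endswith(_SECONDARY)), None)
-- ===== Notes on version B (the rewrite author's own statement) =====
-- stated objective: simpler
-- what changed: Replaces the single early-exit loop that maintains a 'best' accumulator with two successive declarative next(...) scans: first for tabular suffixes, then for secondary suffixes.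
import Mathlib
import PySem

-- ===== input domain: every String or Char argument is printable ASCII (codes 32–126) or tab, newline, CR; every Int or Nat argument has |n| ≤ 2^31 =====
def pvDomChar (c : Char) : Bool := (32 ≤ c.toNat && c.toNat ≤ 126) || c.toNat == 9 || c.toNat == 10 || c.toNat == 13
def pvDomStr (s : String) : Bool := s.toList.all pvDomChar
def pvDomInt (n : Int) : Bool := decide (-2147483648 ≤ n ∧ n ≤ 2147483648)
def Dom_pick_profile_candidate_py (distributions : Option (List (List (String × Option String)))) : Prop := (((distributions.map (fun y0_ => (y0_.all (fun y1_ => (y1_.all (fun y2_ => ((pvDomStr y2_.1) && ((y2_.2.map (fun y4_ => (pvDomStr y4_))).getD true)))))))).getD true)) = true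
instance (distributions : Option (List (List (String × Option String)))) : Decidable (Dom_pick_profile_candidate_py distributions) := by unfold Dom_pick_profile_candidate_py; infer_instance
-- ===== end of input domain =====

-- B replaces A's single early-exit loop with a 'best' accumulator by two successive find-first scans (simpler decomposition); same values everywhere.


-- ===== PORT A =====
-- r.get("url") : dict.get with default None; value type is Option String, so flatten
def pvGetUrl (r : List (String × Option String)) : Option String :=
  ((PySem.Dict.mk r).get? "url").join

-- url = (r.get("url") or "").lower()  ('or' maps both None and "" to "", which getD "" matches since "" stays "")
def pvUrlLower (r : List (String × Option String)) : String :=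
  PySem.Str.lower ((pvGetUrl r).getD "")

def pvEndsTabular (u : String) : Bool :=
  PySem.Str.endswith u ".csv" || PySem.Str.endswith u ".tsv" || PySem.Str.endswith u ".txt"

def pvEndsSecondary (u : String) : Bool :=
  PySem.Str.endswith u ".json" || PySem.Str.endswith u ".geojson" ||
  PySem.Str.endswith u ".xlsx" || PySem.Str.endswith u ".xls" || PySem.Str.endswith u ".parquet"

-- the for-loop of A with its 'best' accumulator
def pvLoopA : List (List (String × Option String)) → Option String → Option String
  | [], best => best
  | r :: rest, best =>
    let url := pvUrlLower r
    if pvEndsTabular url then pvGetUrl r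
    else if best.isNone && pvEndsSecondary url then pvLoopA rest (pvGetUrl r)
    else pvLoopA rest best

def pick_profile_candidate_py (distributions : Option (List (List (String × Option String)))) : Option String :=
  pvLoopA (distributions.getD []) none

-- ===== PORT B =====
-- B: two successive find-first scans (next(...) over a filtered generator), no accumulator
def pvIsTabular (r : List (String × Option String)) : Bool := pvEndsTabular (pvUrlLower r)
def pvIsSecondary (r : List (String × Option String)) : Bool := pvEndsSecondary (pvUrlLower r)

def pick_profile_candidate_py_alt (distributions : Option (List (List (String × Option String)))) : Option String :=
  let rows := distributions.getD []
  let first := (rows.find? pvIsTabular).bind pvGetUrl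
  if first.isSome then first
  else (rows.find? pvIsSecondary).bind pvGetUrl

-- ===== PRECONDITION & SPEC =====
def Spec_pick_profile_candidate_py (distributions : Option (List (List (String × Option String)))) (out : Option String) : Prop := out = pick_profile_candidate_py_alt distributions
instance (distributions : Option (List (List (String × Option String)))) (out : Option String) : Decidable (Spec_pick_profile_candidate_py distributions out) := by unfold Spec_pick_profile_candidate_py; infer_instance

-- ===== CLAIM (what is proved, stated in full; the proofs are below) =====
def Claim_equal_pick_profile_candidate_py : Prop := ∀ (distributions : Option (List (List (String × Option String)))), Dom_pick_profile_candidate_py distributions → Spec_pick_profile_candidate_py distributions (pick_profile_candidate_py distributions)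

-- ===== LEMMAS AND PROOFS =====

-- a row matching a suffix class necessarily has a present, non-None url
lemma pvIsTabular_isSome {r : List (String × Option String)} (h : pvIsTabular r = true) :
    (pvGetUrl r).isSome = true := by
  cases hu : pvGetUrl r with
  | some v => rfl
  | none =>
    exfalso
    simp [pvIsTabular, pvUrlLower, hu] at h
    revert h; decide

lemma pvIsSecondary_isSome {r : List (String × Option String)} (h : pvIsSecondary r = true) :
    (pvGetUrl r).isSome = true := by
  cases hu : pvGetUrl r with
  | some v => rfl
  | none =>
    exfalso
    simp [pvIsSecondary, pvUrlLower, hu] at h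
    revert h; decide

-- characterisation of A's loop in terms of B's two scans
lemma pvLoopA_eq (xs : List (List (String × Option String))) (best : Option String) :
    pvLoopA xs best =
      match xs.find? pvIsTabular with
      | some r => pvGetUrl r
      | none =>
        match best with
        | some b => some b
        | none => (xs.find? pvIsSecondary).bind pvGetUrl := by
  induction xs generalizing best with
  | nil => cases best <;> simp [pvLoopA]
  | cons r rest ih =>
    by_cases ht : pvIsTabular r = true
    · have hf : List.find? pvIsTabular (r :: rest) = some r := List.find?_cons_of_pos ht
      have ht' : pvEndsTabular (pvUrlLower r) = true := ht
      simp [pvLoopA, ht', hf]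
    · have ht' : pvEndsTabular (pvUrlLower r) = false := by simpa [pvIsTabular] using ht
      have hfT : List.find? pvIsTabular (r :: rest) = List.find? pvIsTabular rest :=
        List.find?_cons_of_neg (by simpa [pvIsTabular] using ht)
      by_cases hs : pvIsSecondary r = true
      · have hs' : pvEndsSecondary (pvUrlLower r) = true := hs
        have hfS : List.find? pvIsSecondary (r :: rest) = some r := List.find?_cons_of_pos hs
        cases best with
        | some b => simp [pvLoopA, ht', hfT, ih]
        | none =>
          simp only [pvLoopA, ht', if_false, Option.isNone_none, Bool.true_and, hs', if_true]
          rw [ih]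
          obtain ⟨v, hv⟩ := Option.isSome_iff_exists.mp (pvIsSecondary_isSome hs)
          cases hrt : List.find? pvIsTabular rest <;> simp [hfT, hfS, hv, hrt]
      · have hs' : pvEndsSecondary (pvUrlLower r) = false := by simpa [pvIsSecondary] using hs
        have hfS : List.find? pvIsSecondary (r :: rest) = List.find? pvIsSecondary rest :=
          List.find?_cons_of_neg (by simpa [pvIsSecondary] using hs)
        simp [pvLoopA, ht', hs', hfT, hfS, ih]

-- ===== VERDICT (by name: the statement is the Claim_ definition above) =====
theorem pick_profile_candidate_py_spec : Claim_equal_pick_profile_candidate_py := by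
  intro d _
  unfold Spec_pick_profile_candidate_py pick_profile_candidate_py pick_profile_candidate_py_alt
  rw [pvLoopA_eq]
  cases hfT : (d.getD []).find? pvIsTabular with
  | some r =>
    have := pvIsTabular_isSome (List.find?_eq_some_iff_append.mp hfT).1
    cases hv : pvGetUrl r with
    | none => rw [hv] at this; simp at this
    | some v => simp [hfT, hv]
  | none =>
    cases hfS : (d.getD []).find? pvIsSecondary with
    | some r =>
      have := pvIsSecondary_isSome (List.find?_eq_some_iff_append.mp hfS).1
      cases hv : pvGetUrl r with
      | none => rw [hv] at this; simp at this
      | some v => simp [hfT, hfS, hv]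
    | none => simp [hfT, hfS]
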